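-- pv_equiv track=rewrite | github.com/Evandabest/Mindfold | Flask-backend/Generators/Takuzugen.py | _solve_count_solutions
-- ===== SOURCE A (Python) =====
-- from typing import List, Optional, Tuple
--
-- EMPTY = -1
--
-- def _no_three_consecutive(line: List[int]) -> bool:
--     # line may include EMPTY
--     for i in range(len(line) - 2):
--         a, b, c = line[i], line[i + 1], line[i + 2]
--         if a != EMPTY and a == b == c:
--             return False
--     return True
--
-- def _count_ok(line: List[int]) -> bool:
--     # For size N, each line must have exactly N/2 zeros and N/2 ones.
--     # Partial lines: counts cannot exceed N/2.
--     n = len(line)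
--     half = n // 2
--     z = sum(1 for x in line if x == 0)
--     o = sum(1 for x in line if x == 1)
--     if z > half or o > half:
--         return False
--     # If complete line, must be exactly half/half
--     if EMPTY not in line:
--         return z == half and o == half
--     return True
--
-- def _line_signature(line: List[int]) -> Optional[Tuple[int, ...]]:
--     # Only compare duplicates when fully filled
--     if EMPTY in line:
--         return None
--     return tuple(line)
--
-- def _valid_after_set(grid: List[List[int]], r: int, c: int, n: int) -> bool:
--     # row/col constraints
--     row = grid[r]
--     col = [grid[i][c] for i in range(n)]
--
--     if not _no_three_consecutive(row) or not _no_three_consecutive(col):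
--         return False
--     if not _count_ok(row) or not _count_ok(col):
--         return False
--
--     # "No identical rows/cols" rule (only check when a line becomes complete)
--     row_sig = _line_signature(row)
--     if row_sig is not None:
--         for rr in range(n):
--             if rr != r and _line_signature(grid[rr]) == row_sig:
--                 return False
--
--     col_sig = _line_signature(col)
--     if col_sig is not None:
--         for cc in range(n):
--             if cc != c:
--                 other_col = [grid[i][cc] for i in range(n)]
--                 if _line_signature(other_col) == col_sig:
--                     return False
--
--     return True
--
-- def _find_next_cell(grid: List[List[int]]) -> Optional[Tuple[int, int]]:
--     n = len(grid)
--     for r in range(n):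
--         for c in range(n):
--             if grid[r][c] == EMPTY:
--                 return r, c
--     return None
--
-- def _solve_count_solutions(
--     grid: List[List[int]],
--     limit: int = 2,
-- ) -> int:
--     """
--     Counts solutions up to 'limit' (early exit). Used for uniqueness checking.
--     """
--     n = len(grid)
--     nxt = _find_next_cell(grid)
--     if nxt is None:
--         return 1
--
--     r, c = nxt
--     # Try 0/1
--     total = 0
--     for v in (0, 1):
--         grid[r][c] = v
--         if _valid_after_set(grid, r, c, n):
--             total += _solve_count_solutions(grid, limit)
--             if total >= limit:
--                 grid[r][c] = EMPTY
--                 return total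
--         grid[r][c] = EMPTY
--     return total
-- ===== SOURCE B (Python) =====
-- # Iterative re-implementation: the recursion of _solve_count_solutions is replaced by an
-- # explicit stack of frames driven by a three-event loop (descend / ret / advance); the
-- # validation helpers are rewritten in comprehension style. Like the original, it mutates
-- # `grid` during the search but fully restores it before returning.
-- from typing import List, Optional, Tuple
--
-- EMPTY = -1
--
-- def _no_three_consecutive(line: List[int]) -> bool:
--     return not any(line[i] != EMPTY and line[i] == line[i + 1] == line[i + 2]
--                    for i in range(len(line) - 2))
--
-- def _count_ok(line: List[int]) -> bool:
--     half = len(line) // 2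
--     z = line.count(0)
--     o = line.count(1)
--     if EMPTY in line:
--         return z <= half and o <= half
--     return z == half and o == half
--
-- def _line_signature(line: List[int]) -> Optional[Tuple[int, ...]]:
--     return None if EMPTY in line else tuple(line)
--
-- def _valid_after_set(grid: List[List[int]], r: int, c: int, n: int) -> bool:
--     row = grid[r]
--     col = [grid[i][c] for i in range(n)]
--     if not all(_no_three_consecutive(l) and _count_ok(l) for l in (row, col)):
--         return False
--     row_sig = _line_signature(row)
--     if row_sig is not None and any(
--             rr != r and _line_signature(grid[rr]) == row_sig for rr in range(n)):
--         return False
--     col_sig = _line_signature(col)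
--     if col_sig is not None and any(
--             cc != c and _line_signature([grid[i][cc] for i in range(n)]) == col_sig
--             for cc in range(n)):
--         return False
--     return True
--
-- def _find_next_cell(grid: List[List[int]]) -> Optional[Tuple[int, int]]:
--     n = len(grid)
--     return next(((r, c) for r in range(n) for c in range(n) if grid[r][c] == EMPTY), None)
--
-- def _solve_count_solutions(grid, limit=2):
--     n = len(grid)
--     stack = []                     # frames [r, c, v_tried, total]
--     kind, val = "descend", 0       # current event: "descend" | "ret"(val) | "advance"
--     while True:
--         if kind == "descend":
--             nxt = _find_next_cell(grid)
--             if nxt is None: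
--                 kind, val = "ret", 1
--             else:
--                 r, c = nxt
--                 grid[r][c] = 0
--                 stack.append([r, c, 0, 0])
--                 kind = "descend" if _valid_after_set(grid, r, c, n) else "advance"
--         elif kind == "ret":
--             if not stack:
--                 return val
--             frame = stack[-1]
--             frame[3] += val
--             if frame[3] >= limit:
--                 grid[frame[0]][frame[1]] = EMPTY
--                 stack.pop()
--                 kind, val = "ret", frame[3]
--             else:
--                 kind = "advance"
--         else:                      # "advance": try the next value of the top frame, or close it
--             frame = stack[-1]
--             if frame[2] == 0:
--                 frame[2] = 1
--                 grid[frame[0]][frame[1]] = 1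
--                 kind = "descend" if _valid_after_set(grid, frame[0], frame[1], n) else "advance"
--             else:
--                 grid[frame[0]][frame[1]] = EMPTY
--                 stack.pop()
--                 kind, val = "ret", frame[3]
-- ===== Notes on version B (the rewrite author's own statement) =====
-- stated objective: alternative
-- what changed: The recursive backtracking counter is replaced by an iterative DFS: an explicit stack of frames [r, c, value_tried, running_total] driven by a three-event loop (descend / ret / advance), with the same cell scan, validity check, restore discipline and early exit at the limit.
-- outside the precondition, e.g. on _solve_count_solutions([[-1], [0, 1]], 2): A returns 0, B returns 0
import Mathlib
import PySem

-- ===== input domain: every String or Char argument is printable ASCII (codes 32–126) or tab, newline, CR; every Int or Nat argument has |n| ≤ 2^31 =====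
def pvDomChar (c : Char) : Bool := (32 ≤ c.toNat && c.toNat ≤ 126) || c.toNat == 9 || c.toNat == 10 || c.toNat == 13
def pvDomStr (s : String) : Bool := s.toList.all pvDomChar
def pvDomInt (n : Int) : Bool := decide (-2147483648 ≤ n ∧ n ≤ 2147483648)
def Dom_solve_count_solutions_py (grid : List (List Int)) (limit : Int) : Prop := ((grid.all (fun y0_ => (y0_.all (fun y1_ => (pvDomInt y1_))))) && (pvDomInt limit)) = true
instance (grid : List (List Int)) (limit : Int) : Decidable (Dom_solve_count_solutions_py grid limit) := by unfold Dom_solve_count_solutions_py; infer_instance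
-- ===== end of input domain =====

-- B replaces A's recursive backtracking by an iterative DFS over an explicit stack of
-- frames driven by a descend/ret/advance event loop; equivalence is about the RETURN
-- value only (the Python versions both mutate `grid` during the search and restore it).

-- ===== PORT A =====
-- shared module helpers (_no_three_consecutive, _count_ok, _line_signature,
-- _valid_after_set, _find_next_cell); `getD` defaults are only reached outside Pre_
-- (inside Pre_ every index is in range, where Python would otherwise raise IndexError).

def noThree (line : List Int) : Bool :=
  (List.range (line.length - 2)).all fun i =>
    !((line.getD i 0 != -1) && (line.getD i 0 == line.getD (i+1) 0)
        && (line.getD (i+1) 0 == line.getD (i+2) 0))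

def countOk (line : List Int) : Bool :=
  let half := line.length / 2
  let z := line.countP (· == 0)
  let o := line.countP (· == 1)
  if z > half || o > half then false
  else if !(line.contains (-1)) then (z == half && o == half)
  else true

-- _line_signature: `some line` plays the tuple, `none` plays Python's None
def lineSig (line : List Int) : Option (List Int) :=
  if line.contains (-1) then none else some line

def colOf (grid : List (List Int)) (c n : Nat) : List Int :=
  (List.range n).map fun i => (grid.getD i []).getD c 0

def validAfterSet (grid : List (List Int)) (r c n : Nat) : Bool :=
  let row := grid.getD r []
  let col := colOf grid c n
  if !noThree row || !noThree col then false
  else if !countOk row || !countOk col then false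
  else
    let rowOk :=
      match lineSig row with
      | none => true
      | some sig => (List.range n).all fun rr =>
          !(rr != r && (lineSig (grid.getD rr []) == some sig))
    if !rowOk then false
    else
      match lineSig col with
      | none => true
      | some sig => (List.range n).all fun cc =>
          !(cc != c && (lineSig (colOf grid cc n) == some sig))

def findNextCell (grid : List (List Int)) : Option (Nat × Nat) :=
  let n := grid.length
  (List.range n).findSome? fun r => (List.range n).findSome? fun c =>
    if (grid.getD r []).getD c 0 == -1 then some (r, c) else none

-- grid[r][c] = v (functional update; Python mutates in place and restores)
def setCell (grid : List (List Int)) (r c : Nat) (v : Int) : List (List Int) :=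
  grid.set r ((grid.getD r []).set c v)

-- number of EMPTY cells in the scanned n×n region: termination measure for port A
-- and fuel bound for port B
def emptyCount (grid : List (List Int)) : Nat :=
  ∑ r ∈ Finset.range grid.length, ∑ c ∈ Finset.range grid.length,
    (if (grid.getD r []).getD c 0 = -1 then 1 else 0)

-- the next two lemmas are cited by port A's decreasing_by (they must precede it)
theorem findNextCell_some {grid : List (List Int)} {r c : Nat}
    (h : findNextCell grid = some (r, c)) :
    r < grid.length ∧ c < grid.length ∧ (grid.getD r []).getD c 0 = -1 := by
  unfold findNextCell at h
  obtain ⟨a, ha, hfa⟩ := List.exists_of_findSome?_eq_some h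
  obtain ⟨b, hb, hfb⟩ := List.exists_of_findSome?_eq_some hfa
  simp only [List.mem_range] at ha hb
  split at hfb
  · rename_i hcell
    injection hfb with hfb
    injection hfb with h1 h2
    subst h1; subst h2
    exact ⟨ha, hb, by simpa using hcell⟩
  · exact absurd hfb (by simp)

theorem length_setCell' (grid : List (List Int)) (r c : Nat) (v : Int) :
    (setCell grid r c v).length = grid.length := by
  simp [setCell]

theorem getD_ge {α : Type} (l : List α) (i : Nat) (d : α) (h : ¬ i < l.length) :
    l.getD i d = d := by
  simp [List.getD]; rw [List.getElem?_eq_none (Nat.le_of_not_lt h)]; rfl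

theorem getD_set {α : Type} (l : List α) (i j : Nat) (a d : α) (h : i < l.length) :
    (l.set i a).getD j d = if j = i then a else l.getD j d := by
  simp [List.getD, List.getElem?_set]
  split
  · rename_i he; subst he; simp [List.getElem?_eq_getElem h]
  · rename_i he; rw [if_neg (fun x => he x.symm)]

theorem getD_lt_of_getD_ne {α : Type} (l : List α) (i : Nat) (d : α)
    (h : l.getD i d ≠ d) : i < l.length := by
  by_contra hc; exact h (getD_ge l i d hc)

theorem getD_setCell (grid : List (List Int)) (r c : Nat) (v : Int) (r' c' : Nat)
    (hr : r < grid.length) (hc : c < (grid.getD r []).length) :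
    ((setCell grid r c v).getD r' []).getD c' 0 =
      if r' = r ∧ c' = c then v else (grid.getD r' []).getD c' 0 := by
  unfold setCell
  rw [getD_set _ _ _ _ _ hr]
  by_cases hrr : r' = r
  · subst hrr
    rw [if_pos rfl, getD_set _ _ _ _ _ hc]
    by_cases hcc : c' = c
    · simp [hcc]
    · simp [hcc]
  · simp [hrr]

theorem emptyCount_setCell_lt (grid : List (List Int)) (r c : Nat) (v : Int)
    (hv : v ≠ -1) (h : findNextCell grid = some (r, c)) :
    emptyCount (setCell grid r c v) < emptyCount grid := by
  obtain ⟨hr, hcn, hval⟩ := findNextCell_some h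
  have hc : c < (grid.getD r []).length :=
    getD_lt_of_getD_ne _ _ _ (by rw [hval]; decide)
  unfold emptyCount
  rw [length_setCell']
  apply Finset.sum_lt_sum
  · intro r' _
    apply Finset.sum_le_sum
    intro c' _
    rw [getD_setCell grid r c v r' c' hr hc]
    split
    · rename_i hx
      rw [hx.1, hx.2] at *
      simp [hval, hv]
    · exact le_rfl
  · refine ⟨r, Finset.mem_range.2 hr, ?_⟩
    apply Finset.sum_lt_sum
    · intro c' _
      rw [getD_setCell grid r c v r c' hr hc]
      split
      · rename_i hx
        rw [hx.2] at *
        simp [hval, hv]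
      · exact le_rfl
    · refine ⟨c, Finset.mem_range.2 hcn, ?_⟩
      rw [getD_setCell grid r c v r c hr hc]
      have hval' : (grid[r]?.getD [])[c]?.getD 0 = -1 := by simpa [List.getD] using hval
      simp [hval', hv]

def solveA (grid : List (List Int)) (limit : Int) : Int :=
  match hfind : findNextCell grid with
  | none => 1
  | some (r, c) =>
    let n := grid.length
    -- for v in (0, 1): set grid[r][c] = v (the restore to EMPTY between iterations is
    -- implicit: updates are functional), test validity, recurse, early exit at limit
    let g0 := setCell grid r c 0
    let g1 := setCell grid r c 1
    if validAfterSet g0 r c n then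
      let t0 := solveA g0 limit
      if limit ≤ t0 then t0
      else if validAfterSet g1 r c n then t0 + solveA g1 limit
      else t0
    else if validAfterSet g1 r c n then solveA g1 limit
    else 0
termination_by emptyCount grid
decreasing_by
  all_goals exact emptyCount_setCell_lt _ _ _ _ (by decide) hfind

def solve_count_solutions_py (grid : List (List Int)) (limit : Int) : Int :=
  solveA grid limit

-- ===== PORT B =====
-- Source B's comprehension-style validation helpers (same getD convention as port A's)
def noThreeB (line : List Int) : Bool :=
  !((List.range (line.length - 2)).any fun i =>
    (line.getD i 0 != -1) && (line.getD i 0 == line.getD (i+1) 0)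
      && (line.getD (i+1) 0 == line.getD (i+2) 0))

def countOkB (line : List Int) : Bool :=
  let half := line.length / 2
  let z := line.countP (· == 0)
  let o := line.countP (· == 1)
  if line.contains (-1) then decide (z ≤ half) && decide (o ≤ half)
  else z == half && o == half

-- _line_signature: `None if EMPTY in line else tuple(line)`
def lineSigB (line : List Int) : Option (List Int) :=
  if line.contains (-1) then none else some line

def validAfterSetB (grid : List (List Int)) (r c n : Nat) : Bool :=
  let row := grid.getD r []
  let col := colOf grid c n
  if !(noThreeB row && countOkB row && noThreeB col && countOkB col) then false
  else if (match lineSigB row with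
           | none => false
           | some sig => (List.range n).any fun rr =>
               rr != r && (lineSigB (grid.getD rr []) == some sig)) then false
  else if (match lineSigB col with
           | none => false
           | some sig => (List.range n).any fun cc =>
               cc != c && (lineSigB (colOf grid cc n) == some sig)) then false
  else true

-- next(((r, c) for r in range(n) for c in range(n) if grid[r][c] == EMPTY), None)
def findNextCellB (grid : List (List Int)) : Option (Nat × Nat) :=
  let n := grid.length
  (List.range n).findSome? fun r => (List.range n).findSome? fun c =>
    if (grid.getD r []).getD c 0 == -1 then some (r, c) else none

-- iterative DFS: a stack of frames [r, c, v_tried, total] and a three-state event loop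
structure PvFrame where
  r : Nat
  c : Nat
  v : Int
  total : Int
deriving DecidableEq, Repr

inductive PvEv where
  | descend
  | ret (k : Int)
  | advance
deriving DecidableEq, Repr

-- one iteration of Source B's while-loop; `.inl v` is the `return val` exit
def stepB (n : Nat) (limit : Int) (grid : List (List Int)) (stack : List PvFrame)
    (ev : PvEv) : Sum Int (List (List Int) × List PvFrame × PvEv) :=
  match ev with
  | .descend =>
    match findNextCellB grid with
    | none => .inr (grid, stack, .ret 1)
    | some (r, c) =>
      let g := setCell grid r c 0
      .inr (g, ⟨r, c, 0, 0⟩ :: stack,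
        if validAfterSetB g r c n then .descend else .advance)
  | .ret k =>
    match stack with
    | [] => .inl k
    | fr :: rest =>
      let total := fr.total + k
      if limit ≤ total then .inr (setCell grid fr.r fr.c (-1), rest, .ret total)
      else .inr (grid, ⟨fr.r, fr.c, fr.v, total⟩ :: rest, .advance)
  | .advance =>
    match stack with
    | [] => .inl 0   -- unreachable: "advance" is only issued with a non-empty stack
    | fr :: rest =>
      if fr.v == 0 then
        let g := setCell grid fr.r fr.c 1
        .inr (g, ⟨fr.r, fr.c, 1, fr.total⟩ :: rest,
          if validAfterSetB g fr.r fr.c n then .descend else .advance)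
      else .inr (setCell grid fr.r fr.c (-1), rest, .ret fr.total)

-- Source B's `while True`; the fuel argument is a totality guard only, proven sufficient
def runB (n : Nat) (limit : Int) : Nat → List (List Int) → List PvFrame → PvEv → Int
  | 0, _, _, _ => 0
  | fuel+1, grid, stack, ev =>
    match stepB n limit grid stack ev with
    | .inl v => v
    | .inr (g, s, e) => runB n limit fuel g s e

def solve_count_solutions_py_alt (grid : List (List Int)) (limit : Int) : Int :=
  runB grid.length limit (7 * 2 ^ emptyCount grid + 2) grid [] .descend

-- ===== PRECONDITION & SPEC =====
-- Pre_ requires every row to have at least len(grid) entries: on shorter (ragged) rows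
-- the Python raises IndexError, except on degenerate grids where the search dies before
-- touching a missing cell (there A returns; one such excluded input is cited in the claim).
def Pre_solve_count_solutions_py (grid : List (List Int)) (limit : Int) : Prop :=
  ∀ row ∈ grid, grid.length ≤ row.length
instance (grid : List (List Int)) (limit : Int) :
    Decidable (Pre_solve_count_solutions_py grid limit) := by
  unfold Pre_solve_count_solutions_py; infer_instance

def pvWitness_solve_count_solutions_py : List (List Int) × Int :=
  ([[-1, 0], [0, -1]], 2)

def Spec_solve_count_solutions_py (grid : List (List Int)) (limit : Int) (out : Int) : Prop := out = solve_count_solutions_py_alt grid limit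
instance (grid : List (List Int)) (limit : Int) (out : Int) : Decidable (Spec_solve_count_solutions_py grid limit out) := by unfold Spec_solve_count_solutions_py; infer_instance

-- ===== CLAIM (what is proved, stated in full; the proofs are below) =====
def Claim_equal_solve_count_solutions_py : Prop := ∀ (grid : List (List Int)) (limit : Int), Dom_solve_count_solutions_py grid limit → Pre_solve_count_solutions_py grid limit → Spec_solve_count_solutions_py grid limit (solve_count_solutions_py grid limit)

-- ===== LEMMAS AND PROOFS =====

theorem getD_lt {α : Type} (l : List α) (i : Nat) (d : α) (h : i < l.length) :
    l.getD i d = l[i] := by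
  simp [List.getD, List.getElem?_eq_getElem h]


-- finite iteration of stepB (proof device for the while-loop)
def stepsB (n : Nat) (limit : Int) :
    Nat → (List (List Int) × List PvFrame × PvEv) →
    Sum Int (List (List Int) × List PvFrame × PvEv)
  | 0, st => .inr st
  | k+1, st =>
    match stepB n limit st.1 st.2.1 st.2.2 with
    | .inl v => .inl v
    | .inr st' => stepsB n limit k st'

theorem stepsB_add (n : Nat) (limit : Int) (a b : Nat) :
    ∀ st st', stepsB n limit a st = .inr st' →
      stepsB n limit (a + b) st = stepsB n limit b st' := by
  induction a with
  | zero => intro st st' h; simp [stepsB] at h; simp [h]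
  | succ a ih =>
    intro st st' h
    rw [Nat.succ_add]
    simp only [stepsB] at h ⊢
    cases hs : stepB n limit st.1 st.2.1 st.2.2 with
    | inl v => rw [hs] at h; exact absurd h (by simp)
    | inr st'' => rw [hs] at h; exact ih _ _ h

theorem runB_of_steps (n : Nat) (limit : Int) (k : Nat) :
    ∀ (m : Nat) st st', stepsB n limit k st = .inr st' →
      runB n limit (k + m) st.1 st.2.1 st.2.2 = runB n limit m st'.1 st'.2.1 st'.2.2 := by
  induction k with
  | zero => intro m st st' h; simp [stepsB] at h; simp [h]
  | succ k ih =>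
    intro m st st' h
    rw [Nat.succ_add]
    obtain ⟨g, s, e⟩ := st
    simp only [stepsB] at h
    simp only [runB]
    cases hs : stepB n limit g s e with
    | inl v => simp [hs] at h
    | inr st'' =>
      simp only [hs] at h ⊢
      obtain ⟨g'', s'', e''⟩ := st''
      exact ih m (g'', s'', e'') st' h

theorem set_getD_self {α : Type} (l : List α) (i : Nat) (d : α) (h : i < l.length)
    (hv : l[i] = d) : l.set i d = l := by
  apply List.ext_getElem (by simp)
  intro j hj hj2
  rw [List.getElem_set]
  split
  · rename_i he; subst he; exact hv.symm
  · rfl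

theorem setCell_setCell (grid : List (List Int)) (r c : Nat) (v w : Int)
    (hr : r < grid.length) :
    setCell (setCell grid r c v) r c w = setCell grid r c w := by
  unfold setCell
  rw [getD_set _ _ _ _ _ hr, if_pos rfl, List.set_set, List.set_set]

theorem setCell_restore (grid : List (List Int)) (r c : Nat) (v : Int)
    (hr : r < grid.length) (hval : (grid.getD r []).getD c 0 = -1) :
    setCell (setCell grid r c v) r c (-1) = grid := by
  have hc : c < (grid.getD r []).length :=
    getD_lt_of_getD_ne _ _ _ (by rw [hval]; decide)
  rw [setCell_setCell _ _ _ _ _ hr]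
  unfold setCell
  rw [set_getD_self _ _ _ hc (by rw [← getD_lt _ _ (0:Int) hc]; exact hval)]
  rw [getD_lt _ _ _ hr]
  exact set_getD_self _ _ _ hr rfl

theorem noThreeB_eq (line : List Int) : noThreeB line = noThree line := by
  unfold noThreeB noThree
  induction List.range (line.length - 2) with
  | nil => rfl
  | cons x xs ih => simp_all

theorem countOkB_eq (line : List Int) : countOkB line = countOk line := by
  unfold countOkB countOk
  by_cases h : line.contains (-1)
  · simp only [h]
    by_cases hz : line.countP (· == 0) ≤ line.length / 2 <;>
      by_cases ho : line.countP (· == 1) ≤ line.length / 2 <;>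
      simp [hz, ho] <;> omega
  · simp only [h]
    by_cases hz : line.countP (· == 0) ≤ line.length / 2 <;>
      by_cases ho : line.countP (· == 1) ≤ line.length / 2 <;>
      simp [hz, ho] <;> omega

theorem lineSigB_eq (line : List Int) : lineSigB line = lineSig line := rfl

theorem findNextCellB_eq : findNextCellB = findNextCell := rfl

theorem all_not_eq {α : Type} (l : List α) (p : α → Bool) :
    (l.all fun x => !(p x)) = !(l.any p) := by
  induction l with
  | nil => rfl
  | cons x xs ih => by_cases h : p x <;> simp [h, ih]

theorem match_any_eq (o : Option (List Int)) (q : Nat → List Int → Bool) (n : Nat) :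
    (match o with
     | none => false
     | some sig => (List.range n).any fun i => q i sig)
    = !(match o with
        | none => true
        | some sig => (List.range n).all fun i => !(q i sig)) := by
  cases o <;> simp [all_not_eq]

theorem if_not_false_true (m : Bool) : (if (!m) = true then false else true) = m := by
  cases m <;> simp

theorem validAfterSetB_eq (grid : List (List Int)) (r c n : Nat) :
    validAfterSetB grid r c n = validAfterSet grid r c n := by
  unfold validAfterSetB validAfterSet
  simp only [noThreeB_eq, countOkB_eq, lineSigB_eq, match_any_eq, if_not_false_true]
  generalize noThree (grid.getD r []) = a
  generalize countOk (grid.getD r []) = b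
  generalize noThree (colOf grid c n) = a'
  generalize countOk (colOf grid c n) = b'
  cases a <;> cases b <;> cases a' <;> cases b' <;> simp

theorem emptyCount_pos {grid : List (List Int)} {r c : Nat}
    (h : findNextCell grid = some (r, c)) : 0 < emptyCount grid := by
  obtain ⟨hr, hcn, hval⟩ := findNextCell_some h
  unfold emptyCount
  have hinner : (0:Nat) <
      ∑ c' ∈ Finset.range grid.length, (if (grid.getD r []).getD c' 0 = -1 then 1 else 0) := by
    apply Finset.sum_pos' (fun i _ => by positivity)
    have hval' : (grid[r]?.getD [])[c]?.getD 0 = -1 := by simpa [List.getD] using hval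
    exact ⟨c, Finset.mem_range.2 hcn, by simp [hval']⟩
  exact lt_of_lt_of_le hinner
    (Finset.single_le_sum (f := fun r' =>
      ∑ c' ∈ Finset.range grid.length, (if (grid.getD r' []).getD c' 0 = -1 then 1 else 0))
      (fun i _ => Nat.zero_le _) (Finset.mem_range.2 hr))

theorem stepsB_cons (n : Nat) (limit : Int) (b : Nat)
    (st st' : List (List Int) × List PvFrame × PvEv)
    (h : stepB n limit st.1 st.2.1 st.2.2 = .inr st') :
    stepsB n limit (1 + b) st = stepsB n limit b st' :=
  stepsB_add n limit 1 b st st' (by simp [stepsB, h])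

-- closing a frame whose value 1 has been tried: ≤ 2 steps to pop it and return t + u
theorem closeFrame (n : Nat) (limit : Int) (gv grid : List (List Int))
    (stack : List PvFrame) (r c : Nat) (t u : Int)
    (hres : setCell gv r c (-1) = grid) :
    ∃ j, j ≤ 2 ∧ stepsB n limit j (gv, ⟨r, c, 1, t⟩ :: stack, .ret u)
      = .inr (grid, stack, .ret (t + u)) := by
  by_cases hl : limit ≤ t + u
  · exact ⟨1, by omega, by simp [stepsB, stepB, hl, hres]⟩
  · exact ⟨2, le_rfl, by simp [stepsB, stepB, hl, hres]⟩

-- simulation: from (grid, stack, descend) the machine returns to the same grid and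
-- stack with event `ret (solveA grid limit)`, in at most 7·2^emptyCount - 6 steps
theorem solveA_none {grid : List (List Int)} {limit : Int}
    (hfind : findNextCell grid = none) : solveA grid limit = 1 := by
  rw [solveA]
  split
  · rfl
  · rename_i heq; rw [hfind] at heq; exact absurd heq (by simp)

theorem solveA_some {grid : List (List Int)} {limit : Int} {r c : Nat}
    (hfind : findNextCell grid = some (r, c)) :
    solveA grid limit =
      (if validAfterSet (setCell grid r c 0) r c grid.length = true then
        if limit ≤ solveA (setCell grid r c 0) limit then solveA (setCell grid r c 0) limit
        else if validAfterSet (setCell grid r c 1) r c grid.length = true then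
          solveA (setCell grid r c 0) limit + solveA (setCell grid r c 1) limit
        else solveA (setCell grid r c 0) limit
      else if validAfterSet (setCell grid r c 1) r c grid.length = true then
        solveA (setCell grid r c 1) limit
      else 0) := by
  rw [solveA]
  split
  · rename_i heq; rw [hfind] at heq; exact absurd heq (by simp)
  · rename_i r' c' heq
    rw [hfind] at heq
    injection heq with heq
    injection heq with h1 h2
    subst h1; subst h2
    rfl

-- simulation: from (grid, stack, descend) the machine returns to the same grid and
-- stack with event `ret (solveA grid limit)`, in at most 7·2^emptyCount - 6 steps
theorem simB (limit : Int) (n : Nat) :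
    ∀ (e : Nat) (grid : List (List Int)) (stack : List PvFrame),
      grid.length = n → emptyCount grid ≤ e →
      ∃ k, k ≤ 7 * 2 ^ emptyCount grid - 6 ∧
        stepsB n limit k (grid, stack, .descend)
          = .inr (grid, stack, .ret (solveA grid limit)) := by
  intro e
  induction e with
  | zero =>
    intro grid stack hn he
    cases hfind : findNextCell grid with
    | none =>
      refine ⟨1, by have := Nat.one_le_two_pow (n := emptyCount grid); omega, ?_⟩
      simp [stepsB, stepB, findNextCellB_eq, hfind, solveA_none hfind]
    | some rc =>
      obtain ⟨r, c⟩ := rc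
      exact absurd (emptyCount_pos hfind) (by omega)
  | succ e ih =>
    intro grid stack hn he
    cases hfind : findNextCell grid with
    | none =>
      refine ⟨1, by have := Nat.one_le_two_pow (n := emptyCount grid); omega, ?_⟩
      simp [stepsB, stepB, findNextCellB_eq, hfind, solveA_none hfind]
    | some rc =>
      obtain ⟨r, c⟩ := rc
      obtain ⟨hr, hcn, hval⟩ := findNextCell_some hfind
      have hP1 : (1:Nat) ≤ 2 ^ (emptyCount grid - 1) := Nat.one_le_two_pow
      have hlt0 : emptyCount (setCell grid r c 0) < emptyCount grid :=
        emptyCount_setCell_lt grid r c 0 (by decide) hfind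
      have hlt1 : emptyCount (setCell grid r c 1) < emptyCount grid :=
        emptyCount_setCell_lt grid r c 1 (by decide) hfind
      have hEpos : 0 < emptyCount grid := emptyCount_pos hfind
      have hp0 : 2 ^ emptyCount (setCell grid r c 0) ≤ 2 ^ (emptyCount grid - 1) :=
        Nat.pow_le_pow_right (by norm_num) (by omega)
      have hp1 : 2 ^ emptyCount (setCell grid r c 1) ≤ 2 ^ (emptyCount grid - 1) :=
        Nat.pow_le_pow_right (by norm_num) (by omega)
      have h2E : 2 ^ emptyCount grid = 2 * 2 ^ (emptyCount grid - 1) := by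
        conv_lhs => rw [show emptyCount grid = (emptyCount grid - 1) + 1 by omega]
        rw [pow_succ]; ring
      have hg0len : (setCell grid r c 0).length = n := by rw [length_setCell', hn]
      have hg1len : (setCell grid r c 1).length = n := by rw [length_setCell', hn]
      have h01 : setCell (setCell grid r c 0) r c 1 = setCell grid r c 1 :=
        setCell_setCell grid r c 0 1 hr
      have hres0 : setCell (setCell grid r c 0) r c (-1) = grid :=
        setCell_restore grid r c 0 hr hval
      have hres1 : setCell (setCell grid r c 1) r c (-1) = grid :=
        setCell_restore grid r c 1 hr hval
      rw [solveA_some hfind, hn]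
      by_cases hv0 : validAfterSet (setCell grid r c 0) r c n = true
      · obtain ⟨k0, hk0, hs0⟩ := ih (setCell grid r c 0) (⟨r, c, 0, 0⟩ :: stack) hg0len (by omega)
        by_cases hl0 : limit ≤ solveA (setCell grid r c 0) limit
        · -- 0-branch valid, early exit at the limit
          refine ⟨1 + (k0 + 1), by omega, ?_⟩
          rw [if_pos hv0, if_pos hl0]
          calc stepsB n limit (1 + (k0 + 1)) (grid, stack, .descend)
              = stepsB n limit (k0 + 1)
                  (setCell grid r c 0, ⟨r, c, 0, 0⟩ :: stack, .descend) :=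
                stepsB_cons _ _ _ _ _ (by simp [stepB, findNextCellB_eq, validAfterSetB_eq, hfind, hv0])
            _ = stepsB n limit 1
                  (setCell grid r c 0, ⟨r, c, 0, 0⟩ :: stack,
                    .ret (solveA (setCell grid r c 0) limit)) :=
                stepsB_add _ _ k0 1 _ _ hs0
            _ = .inr (grid, stack, .ret (solveA (setCell grid r c 0) limit)) := by
                simp [stepsB, stepB, hl0, hres0]
        · rw [if_pos hv0, if_neg hl0]
          by_cases hv1 : validAfterSet (setCell grid r c 1) r c n = true
          · -- both values explored
            obtain ⟨k1, hk1, hs1⟩ := ih (setCell grid r c 1)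
              (⟨r, c, 1, solveA (setCell grid r c 0) limit⟩ :: stack) hg1len (by omega)
            obtain ⟨j, hj, hsj⟩ := closeFrame n limit (setCell grid r c 1) grid stack r c
              (solveA (setCell grid r c 0) limit) (solveA (setCell grid r c 1) limit) hres1
            refine ⟨1 + (k0 + (1 + (1 + (k1 + j)))), by omega, ?_⟩
            rw [if_pos hv1]
            calc stepsB n limit (1 + (k0 + (1 + (1 + (k1 + j))))) (grid, stack, .descend)
                = stepsB n limit (k0 + (1 + (1 + (k1 + j))))
                    (setCell grid r c 0, ⟨r, c, 0, 0⟩ :: stack, .descend) :=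
                  stepsB_cons _ _ _ _ _ (by simp [stepB, findNextCellB_eq, validAfterSetB_eq, hfind, hv0])
              _ = stepsB n limit (1 + (1 + (k1 + j)))
                    (setCell grid r c 0, ⟨r, c, 0, 0⟩ :: stack,
                      .ret (solveA (setCell grid r c 0) limit)) :=
                  stepsB_add _ _ k0 _ _ _ hs0
              _ = stepsB n limit (1 + (k1 + j))
                    (setCell grid r c 0,
                      ⟨r, c, 0, solveA (setCell grid r c 0) limit⟩ :: stack, .advance) :=
                  stepsB_cons _ _ _ _ _ (by simp [stepB, hl0])
              _ = stepsB n limit (k1 + j)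
                    (setCell grid r c 1,
                      ⟨r, c, 1, solveA (setCell grid r c 0) limit⟩ :: stack, .descend) :=
                  stepsB_cons _ _ _ _ _ (by simp [stepB, validAfterSetB_eq, h01, hv1])
              _ = stepsB n limit j
                    (setCell grid r c 1,
                      ⟨r, c, 1, solveA (setCell grid r c 0) limit⟩ :: stack,
                      .ret (solveA (setCell grid r c 1) limit)) :=
                  stepsB_add _ _ k1 _ _ _ hs1
              _ = .inr (grid, stack,
                    .ret (solveA (setCell grid r c 0) limit
                      + solveA (setCell grid r c 1) limit)) := hsj
          · -- 1-branch invalid: close the frame with t0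
            refine ⟨1 + (k0 + (1 + (1 + 1))), by omega, ?_⟩
            rw [if_neg hv1]
            calc stepsB n limit (1 + (k0 + (1 + (1 + 1)))) (grid, stack, .descend)
                = stepsB n limit (k0 + (1 + (1 + 1)))
                    (setCell grid r c 0, ⟨r, c, 0, 0⟩ :: stack, .descend) :=
                  stepsB_cons _ _ _ _ _ (by simp [stepB, findNextCellB_eq, validAfterSetB_eq, hfind, hv0])
              _ = stepsB n limit (1 + (1 + 1))
                    (setCell grid r c 0, ⟨r, c, 0, 0⟩ :: stack,
                      .ret (solveA (setCell grid r c 0) limit)) :=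
                  stepsB_add _ _ k0 _ _ _ hs0
              _ = stepsB n limit (1 + 1)
                    (setCell grid r c 0,
                      ⟨r, c, 0, solveA (setCell grid r c 0) limit⟩ :: stack, .advance) :=
                  stepsB_cons _ _ _ _ _ (by simp [stepB, hl0])
              _ = stepsB n limit 1
                    (setCell grid r c 1,
                      ⟨r, c, 1, solveA (setCell grid r c 0) limit⟩ :: stack, .advance) :=
                  stepsB_cons _ _ _ _ _ (by simp [stepB, validAfterSetB_eq, h01, hv1])
              _ = .inr (grid, stack, .ret (solveA (setCell grid r c 0) limit)) := by
                  simp [stepsB, stepB, hres1]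
      · rw [if_neg hv0]
        by_cases hv1 : validAfterSet (setCell grid r c 1) r c n = true
        · -- only the 1-branch is explored
          obtain ⟨k1, hk1, hs1⟩ := ih (setCell grid r c 1) (⟨r, c, 1, 0⟩ :: stack) hg1len (by omega)
          obtain ⟨j, hj, hsj⟩ := closeFrame n limit (setCell grid r c 1) grid stack r c
            0 (solveA (setCell grid r c 1) limit) hres1
          refine ⟨1 + (1 + (k1 + j)), by omega, ?_⟩
          rw [if_pos hv1]
          calc stepsB n limit (1 + (1 + (k1 + j))) (grid, stack, .descend)
              = stepsB n limit (1 + (k1 + j))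
                  (setCell grid r c 0, ⟨r, c, 0, 0⟩ :: stack, .advance) :=
                stepsB_cons _ _ _ _ _ (by simp [stepB, findNextCellB_eq, validAfterSetB_eq, hfind, hv0])
            _ = stepsB n limit (k1 + j)
                  (setCell grid r c 1, ⟨r, c, 1, 0⟩ :: stack, .descend) :=
                stepsB_cons _ _ _ _ _ (by simp [stepB, validAfterSetB_eq, h01, hv1])
            _ = stepsB n limit j
                  (setCell grid r c 1, ⟨r, c, 1, 0⟩ :: stack,
                    .ret (solveA (setCell grid r c 1) limit)) :=
                stepsB_add _ _ k1 _ _ _ hs1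
            _ = .inr (grid, stack, .ret (0 + solveA (setCell grid r c 1) limit)) := hsj
            _ = .inr (grid, stack, .ret (solveA (setCell grid r c 1) limit)) := by
                simp
        · -- both branches invalid: the frame closes with 0
          refine ⟨1 + (1 + 1), by omega, ?_⟩
          rw [if_neg hv1]
          calc stepsB n limit (1 + (1 + 1)) (grid, stack, .descend)
              = stepsB n limit (1 + 1)
                  (setCell grid r c 0, ⟨r, c, 0, 0⟩ :: stack, .advance) :=
                stepsB_cons _ _ _ _ _ (by simp [stepB, findNextCellB_eq, validAfterSetB_eq, hfind, hv0])
            _ = stepsB n limit 1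
                  (setCell grid r c 1, ⟨r, c, 1, 0⟩ :: stack, .advance) :=
                stepsB_cons _ _ _ _ _ (by simp [stepB, validAfterSetB_eq, h01, hv1])
            _ = .inr (grid, stack, .ret 0) := by
                simp [stepsB, stepB, hres1]

-- ===== VERDICT (by name: the statement is the Claim_ definition above) =====
theorem solve_count_solutions_py_spec : Claim_equal_solve_count_solutions_py := by
  intro grid limit _ _
  unfold Spec_solve_count_solutions_py solve_count_solutions_py solve_count_solutions_py_alt
  obtain ⟨k, hk, hsteps⟩ := simB limit grid.length (emptyCount grid) grid [] rfl le_rfl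
  have hfuel : 7 * 2 ^ emptyCount grid + 2 = k + ((7 * 2 ^ emptyCount grid + 2 - k - 1) + 1) := by
    have : (1:Nat) ≤ 2 ^ emptyCount grid := Nat.one_le_two_pow
    omega
  rw [hfuel]
  rw [runB_of_steps grid.length limit k _ (grid, [], .descend) _ hsteps]
  simp [runB, stepB]
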